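-- pv_equiv track=rewrite | github.com/jjindol/Algorithm | Programmers/NM/근접합.py | func
-- ===== SOURCE A (Python) =====
-- def func(arr):
--     result = []
--     n = len(arr)
--
--     for i in range(n):
--         for j in range(i+1,n):
--             lst = []
--             for k in range(n):
--                 if k!=i and k!=j:
--                     lst.append(arr[k])
--             result.append(sum(lst))
--
--     return result
-- ===== SOURCE B (Python) =====
-- def func(arr):
--     n = len(arr)
--     total = sum(arr)
--     return [total - arr[i] - arr[j] for i in range(n) for j in range(i + 1, n)]
-- ===== Notes on version B (the rewrite author's own statement) =====
-- stated objective: faster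
-- what changed: Precompute the total sum once and emit total - arr[i] - arr[j] per pair, replacing A's inner loop that rebuilds and sums a filtered list for every pair.
import Mathlib
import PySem

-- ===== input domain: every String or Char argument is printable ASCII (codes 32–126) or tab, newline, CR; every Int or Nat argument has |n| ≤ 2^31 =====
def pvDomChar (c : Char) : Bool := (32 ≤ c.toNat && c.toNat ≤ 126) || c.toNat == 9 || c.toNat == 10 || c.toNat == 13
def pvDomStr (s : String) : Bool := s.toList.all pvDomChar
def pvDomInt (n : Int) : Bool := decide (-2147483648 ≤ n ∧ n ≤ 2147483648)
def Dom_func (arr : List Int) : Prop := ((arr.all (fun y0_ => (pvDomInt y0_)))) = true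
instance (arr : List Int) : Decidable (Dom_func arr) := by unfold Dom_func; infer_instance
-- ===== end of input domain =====

-- B replaces A's per-pair inner scan by one precomputed total sum: total - arr[i] - arr[j] per pair (faster).

-- ===== PORT A =====
def func (arr : List Int) : List Int :=
  let n : Int := arr.length
  (PySem.List.pyRange 0 n 1).foldl (fun result i =>
    (PySem.List.pyRange (i + 1) n 1).foldl (fun result j =>
      let lst := (PySem.List.pyRange 0 n 1).foldl (fun lst k =>
        if k ≠ i ∧ k ≠ j then lst ++ [PySem.List.pyGetD arr k 0] else lst) []
      result ++ [lst.sum]) result) []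

-- ===== PORT B =====
def func_alt (arr : List Int) : List Int :=
  let n : Int := arr.length
  let total : Int := arr.sum
  (PySem.List.pyRange 0 n 1).flatMap (fun i =>
    (PySem.List.pyRange (i + 1) n 1).map (fun j =>
      total - PySem.List.pyGetD arr i 0 - PySem.List.pyGetD arr j 0))

-- ===== PRECONDITION & SPEC =====
def Spec_func (arr : List Int) (out : List Int) : Prop := out = func_alt arr
instance (arr : List Int) (out : List Int) : Decidable (Spec_func arr out) := by unfold Spec_func; infer_instance

-- ===== CLAIM (what is proved, stated in full; the proofs are below) =====
def Claim_equal_func : Prop := ∀ (arr : List Int), Dom_func arr → Spec_func arr (func arr)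

-- ===== LEMMAS AND PROOFS =====

-- the filtered sum A builds for a pair (i, j) equals total − arr[i] − arr[j]
theorem pv_inner_sum (arr : List Int) (i j : Int) (h0 : 0 ≤ i) (hij : i < j)
    (hj : j < (arr.length : Int)) :
    (((PySem.List.pyRange 0 (arr.length : Int) 1).filter
        (fun k => decide (k ≠ i ∧ k ≠ j))).map (fun k => PySem.List.pyGetD arr k 0)).sum
    = arr.sum - PySem.List.pyGetD arr i 0 - PySem.List.pyGetD arr j 0 := by
  have hsplit : PySem.List.pyRange 0 (arr.length : Int) 1
      = PySem.List.pyRange 0 i 1 ++ (i :: (PySem.List.pyRange (i + 1) j 1 ++ (j :: PySem.List.pyRange (j + 1) (arr.length : Int) 1))) := by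
    rw [PySem.List.pyRange_one_append 0 i (arr.length : Int) h0 (by omega),
        PySem.List.pyRange_one_cons (by omega : i < (arr.length : Int)),
        PySem.List.pyRange_one_append (i + 1) j (arr.length : Int) (by omega) (by omega),
        PySem.List.pyRange_one_cons (by omega : j < (arr.length : Int))]
  have harr : ((PySem.List.pyRange 0 (arr.length : Int) 1).map
      (fun k => PySem.List.pyGetD arr k 0)).sum = arr.sum := by
    rw [PySem.List.map_pyGetD_pyRange_zero']
  have h1 : ∀ (a b : Int), (b ≤ i ∨ i < a) → (b ≤ j ∨ j < a) →
      (PySem.List.pyRange a b 1).filter (fun k => decide (k ≠ i ∧ k ≠ j))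
      = PySem.List.pyRange a b 1 := by
    intro a b hi' hj'
    refine List.filter_eq_self.mpr (fun x hx => ?_)
    have hm := (PySem.List.mem_pyRange_one).mp hx
    simp only [decide_eq_true_eq]
    constructor <;> omega
  rw [← harr, hsplit]
  simp only [List.filter_append, List.filter_cons, List.map_append, List.sum_append,
    List.map_cons, List.sum_cons,
    h1 0 i (by omega) (by omega), h1 (i + 1) j (by omega) (by omega),
    h1 (j + 1) (arr.length : Int) (by omega) (by omega)]
  simp only [decide_eq_true_eq]
  rw [if_neg (by omega : ¬(i ≠ i ∧ i ≠ j)), if_neg (by omega : ¬(j ≠ i ∧ j ≠ j))]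
  simp only [List.map_append, List.sum_append]
  ring

-- ===== VERDICT (by name: the statement is the Claim_ definition above) =====
theorem func_spec : Claim_equal_func := by
  intro arr _
  unfold Spec_func func func_alt
  simp only [PySem.List.foldl_append_singleton_eq_map]
  rw [PySem.List.foldl_append_eq_flatMap]
  simp only [List.nil_append]
  refine List.flatMap_congr (fun i hi => ?_)
  have hib := (PySem.List.mem_pyRange_one).mp hi
  refine List.map_congr_left (fun j hj => ?_)
  have hjb := (PySem.List.mem_pyRange_one).mp hj
  rw [PySem.List.foldl_append_ite]
  simp only [List.nil_append]
  exact pv_inner_sum arr i j (by omega) (by omega) (by omega)
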